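-- pv_equiv track=rewrite | github.com/hengbingao/scFv_Pmpnn_AF2 | scripts/loops_from_sequence.py | fill_gaps_and_remove_isolated_residues
-- ===== SOURCE A (Python) =====
-- def fill_gaps_and_remove_isolated_residues(residues):
--     # Start with the original list of residues in contact
--     filled_residues = sorted(set(residues))
--
--     # Initialize a list to hold the intermediate set of residues, including gap-filled ones
--     intermediate_residues = []
--
--     # Go through the sorted list and fill in the gaps
--     i = 0
--     while i < len(filled_residues) - 1:
--         intermediate_residues.append(filled_residues[i])
--
--         # Check the gap between the current and next residue
--         gap = filled_residues[i + 1] - filled_residues[i]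
--
--         # If the gap is 2 or 3 (indicating 1 or 2 residues missing between them), fill it
--         if gap <= 3:
--             # Add the missing residues to the intermediate list
--             intermediate_residues.extend(range(filled_residues[i] + 1, filled_residues[i + 1]))
--
--         i += 1
--
--     # Add the last residue since it's not covered in the loop
--     intermediate_residues.append(filled_residues[-1])
--
--     # Remove isolated residues
--     final_residues = []
--     for res in intermediate_residues:
--         # Check if the residue has neighbors within 5 residue numbers
--         has_neighbors = any(abs(res - other) <= 3 for other in intermediate_residues if other != res)
--         if has_neighbors:
--             final_residues.append(res)
--
--     return sorted(final_residues)
-- ===== SOURCE B (Python) =====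
-- def fill_gaps_and_remove_isolated_residues(residues):
--     # One pass over the sorted distinct residues: fill small gaps while walking
--     # adjacent pairs, then keep a residue iff an ADJACENT neighbour is within 3
--     # (the list is strictly increasing, so only neighbours can be within 3).
--     s = sorted(set(residues))
--     inter = []
--     for a, b in zip(s, s[1:]):
--         inter.extend(range(a, b) if b - a <= 3 else [a])
--     inter.append(s[-1])
--
--     out = []
--     prev = None
--     for i, r in enumerate(inter):
--         nxt_ok = i + 1 < len(inter) and inter[i + 1] - r <= 3
--         if (prev is not None and r - prev <= 3) or nxt_ok:
--             out.append(r)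
--         prev = r
--     return out
-- ===== Notes on version B (the rewrite author's own statement) =====
-- stated objective: faster
-- what changed: A rebuilds the neighbour test by scanning the whole intermediate list for every residue (quadratic) and re-sorts at the end; B fills gaps in one pass over adjacent pairs of the sorted distinct residues and keeps a residue iff an adjacent neighbour is within 3, which is equivalent because the intermediate list is strictly increasing.
import Mathlib
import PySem

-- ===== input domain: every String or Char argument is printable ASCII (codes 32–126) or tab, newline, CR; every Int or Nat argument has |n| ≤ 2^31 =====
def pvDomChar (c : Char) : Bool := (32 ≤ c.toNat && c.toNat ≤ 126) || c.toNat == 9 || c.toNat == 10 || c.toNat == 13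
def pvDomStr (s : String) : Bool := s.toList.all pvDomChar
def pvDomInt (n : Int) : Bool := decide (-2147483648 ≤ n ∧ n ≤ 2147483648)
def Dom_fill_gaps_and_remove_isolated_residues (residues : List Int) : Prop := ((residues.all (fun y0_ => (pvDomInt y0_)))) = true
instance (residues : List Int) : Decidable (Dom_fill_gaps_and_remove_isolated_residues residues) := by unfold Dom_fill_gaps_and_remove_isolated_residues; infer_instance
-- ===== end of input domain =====

-- B replaces A's whole-list neighbour scan by a one-pass adjacent-neighbour check on the
-- strictly increasing gap-filled list (equivalent there), dropping A's quadratic inner scan.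

-- ===== PORT A =====
-- the 'while i < len(filled_residues) - 1' loop of A
def pvAWhile (f : List Int) (i : Nat) (acc : List Int) : List Int :=
  if i + 1 < f.length then
    let fi := f.getD i 0
    let fj := f.getD (i + 1) 0
    pvAWhile f (i + 1) (acc ++ [fi] ++ (if fj - fi ≤ 3 then PySem.List.pyRange (fi + 1) fj 1 else []))
  else acc
termination_by f.length - i

def fill_gaps_and_remove_isolated_residues (residues : List Int) : List Int :=
  let filled := PySem.List.sorted (PySem.Set.ofList residues) (fun x => x) false
  let inter := pvAWhile filled 0 [] ++
    (match PySem.List.pyGet? filled (-1) with | some x => [x] | none => [])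
  let final := inter.filter (fun res =>
    inter.any (fun other => (other != res) && decide ((res - other).natAbs ≤ 3)))
  PySem.List.sorted final (fun x => x) false

-- ===== PORT B =====
-- 'for a, b in zip(s, s[1:]): inter.extend(range(a, b) if b - a <= 3 else [a])'
def pvFillPairs : List Int → List Int
  | a :: b :: rest => (if b - a ≤ 3 then PySem.List.pyRange a b 1 else [a]) ++ pvFillPairs (b :: rest)
  | _ => []

-- 'prev is not None and r - prev <= 3'
def pvPrevOk (prev : Option Int) (r : Int) : Bool :=
  match prev with | some p => decide (r - p ≤ 3) | none => false

-- 'i + 1 < len(inter) and inter[i + 1] - r <= 3' (the lookahead on the rest of the list)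
def pvNextOk (r : Int) (rest : List Int) : Bool :=
  match rest with | n :: _ => decide (n - r ≤ 3) | [] => false

-- the 'for i, r in enumerate(inter)' loop with the running 'prev'
def pvKeepLoop : Option Int → List Int → List Int
  | _, [] => []
  | prev, r :: rest =>
    (if pvPrevOk prev r || pvNextOk r rest then [r] else []) ++ pvKeepLoop (some r) rest

def fill_gaps_and_remove_isolated_residues_alt (residues : List Int) : List Int :=
  let s := PySem.List.sorted (PySem.Set.ofList residues) (fun x => x) false
  let inter := pvFillPairs s ++ (match s.getLast? with | some x => [x] | none => [])
  pvKeepLoop none inter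

-- ===== PRECONDITION & SPEC =====
-- Python A raises IndexError on the empty list (filled_residues[-1]); excluded.
def Pre_fill_gaps_and_remove_isolated_residues (residues : List Int) : Prop := residues ≠ []
instance (residues : List Int) : Decidable (Pre_fill_gaps_and_remove_isolated_residues residues) := by
  unfold Pre_fill_gaps_and_remove_isolated_residues; infer_instance

def pvWitness_fill_gaps_and_remove_isolated_residues : List Int := [1, 3, 10]

def Spec_fill_gaps_and_remove_isolated_residues (residues : List Int) (out : List Int) : Prop := out = fill_gaps_and_remove_isolated_residues_alt residues
instance (residues : List Int) (out : List Int) : Decidable (Spec_fill_gaps_and_remove_isolated_residues residues out) := by unfold Spec_fill_gaps_and_remove_isolated_residues; infer_instance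

-- ===== CLAIM (what is proved, stated in full; the proofs are below) =====
def Claim_equal_fill_gaps_and_remove_isolated_residues : Prop := ∀ (residues : List Int), Dom_fill_gaps_and_remove_isolated_residues residues → Pre_fill_gaps_and_remove_isolated_residues residues → Spec_fill_gaps_and_remove_isolated_residues residues (fill_gaps_and_remove_isolated_residues residues)

-- ===== LEMMAS AND PROOFS =====

-- A's while loop, restated structurally (proof helper)
def pvFillA : List Int → List Int
  | a :: b :: rest => a :: ((if b - a ≤ 3 then PySem.List.pyRange (a + 1) b 1 else []) ++ pvFillA (b :: rest))
  | _ => []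

theorem pvAWhile_eq (f : List Int) (i : Nat) (acc : List Int) :
    pvAWhile f i acc = acc ++ pvFillA (f.drop i) := by
  rw [pvAWhile]
  split
  next h =>
    rw [pvAWhile_eq f (i + 1)]
    have h1 : i < f.length := by omega
    have hd : f.drop i = f[i] :: f[i + 1] :: f.drop (i + 2) := by
      rw [List.drop_eq_getElem_cons h1, List.drop_eq_getElem_cons h]
    have hgi : f.getD i 0 = f[i] := List.getD_eq_getElem f 0 h1
    have hgj : f.getD (i + 1) 0 = f[i + 1] := List.getD_eq_getElem f 0 h
    rw [hd, hgi, hgj]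
    simp [pvFillA]
  next h =>
    match hdrop : f.drop i with
    | [] => simp [pvFillA]
    | [x] => simp [pvFillA]
    | x :: y :: t =>
      have := congrArg List.length hdrop
      simp [List.length_drop] at this
      omega
termination_by f.length - i

theorem pvFillA_eq_pairs : ∀ (l : List Int), l.Pairwise (· < ·) → pvFillA l = pvFillPairs l
  | [], _ => rfl
  | [_], _ => rfl
  | a :: b :: rest, h => by
    have hab : a < b := (List.pairwise_cons.mp h).1 b (by simp)
    have ih := pvFillA_eq_pairs (b :: rest) (List.pairwise_cons.mp h).2
    simp only [pvFillA, pvFillPairs, ih]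
    split
    · rw [PySem.List.pyRange_one_cons hab]; simp
    · simp

def pvTailPart (l : List Int) : List Int := match l.getLast? with | some x => [x] | none => []

theorem pvFull_pairwise : ∀ (l : List Int), l.Pairwise (· < ·) →
    (pvFillPairs l ++ pvTailPart l).Pairwise (· < ·) ∧
    ∀ x ∈ pvFillPairs l ++ pvTailPart l, ∀ a t, l = a :: t → a ≤ x
  | [], _ => ⟨by simp [pvFillPairs, pvTailPart], by simp [pvFillPairs, pvTailPart]⟩
  | [a], _ => by
    refine ⟨by simp [pvFillPairs, pvTailPart], ?_⟩
    intro x hx a' t' heq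
    cases heq
    simp [pvFillPairs, pvTailPart] at hx
    omega
  | a :: b :: rest, h => by
    have hab : a < b := (List.pairwise_cons.mp h).1 b (by simp)
    have ih := pvFull_pairwise (b :: rest) (List.pairwise_cons.mp h).2
    have hseg : ∀ x ∈ (if b - a ≤ 3 then PySem.List.pyRange a b 1 else [a]), a ≤ x ∧ x < b := by
      intro x hx
      split at hx
      · rcases (PySem.List.mem_pyRange_one).mp hx with ⟨h1, h2⟩; exact ⟨h1, h2⟩
      · simp at hx; omega
    have hsegpw : (if b - a ≤ 3 then PySem.List.pyRange a b 1 else [a]).Pairwise (· < ·) := by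
      split
      · exact PySem.List.pairwise_lt_pyRange_one a b
      · simp
    have htp : pvTailPart (a :: b :: rest) = pvTailPart (b :: rest) := by
      simp [pvTailPart, List.getLast?_cons_cons]
    have hfull' : ∀ x ∈ pvFillPairs (b :: rest) ++ pvTailPart (b :: rest), b ≤ x := by
      intro x hx; exact ih.2 x hx b rest rfl
    constructor
    · show ((if b - a ≤ 3 then PySem.List.pyRange a b 1 else [a]) ++ pvFillPairs (b :: rest)
        ++ pvTailPart (a :: b :: rest)).Pairwise (· < ·)
      rw [htp, List.append_assoc]
      refine List.pairwise_append.mpr ⟨hsegpw, ih.1, ?_⟩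
      intro x hx y hy
      have := (hseg x hx).2
      have := hfull' y hy
      omega
    · intro x hx a' t' heq
      injection heq with h1 h2; subst h1; subst h2
      show a ≤ x
      rw [show pvFillPairs (a :: b :: rest) =
        (if b - a ≤ 3 then PySem.List.pyRange a b 1 else [a]) ++ pvFillPairs (b :: rest) from rfl,
        htp, List.append_assoc] at hx
      rcases List.mem_append.mp hx with hx | hx
      · exact (hseg x hx).1
      · have := hfull' x hx; omega

theorem pvKeepLoop_sublist : ∀ (prev : Option Int) (l : List Int), List.Sublist (pvKeepLoop prev l) l
  | _, [] => List.Sublist.refl _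
  | prev, r :: rest => by
    simp only [pvKeepLoop]
    cases (pvPrevOk prev r || pvNextOk r rest) with
    | true => simpa using List.Sublist.cons₂ r (pvKeepLoop_sublist (some r) rest)
    | false => simpa using List.Sublist.cons r (pvKeepLoop_sublist (some r) rest)

theorem pvKeep_eq_filter : ∀ (post : List Int) (prev : Option Int) (l : List Int),
    post.Pairwise (· < ·) →
    (∀ x ∈ post, x ∈ l) →
    (∀ p, prev = some p → p ∈ l ∧ (∀ x ∈ post, p < x) ∧ (∀ o ∈ l, o ∉ post → o ≤ p)) →
    (prev = none → ∀ o ∈ l, o ∈ post) →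
    post.filter (fun res => l.any (fun other => (other != res) && decide ((res - other).natAbs ≤ 3)))
      = pvKeepLoop prev post
  | [], _, _, _, _, _, _ => rfl
  | r :: rest, prev, l, hpw, hsub, hprev, hnone => by
    have hpwc := List.pairwise_cons.mp hpw
    have hrl : r ∈ l := hsub r (by simp)
    -- the global scan at r decides exactly the local neighbour test
    have hpred : (l.any (fun other => (other != r) && decide ((r - other).natAbs ≤ 3)))
        = (pvPrevOk prev r || pvNextOk r rest) := by
      apply Bool.eq_iff_iff.mpr
      simp only [List.any_eq_true, Bool.and_eq_true, bne_iff_ne, ne_eq, decide_eq_true_eq,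
        pvPrevOk, pvNextOk]
      constructor
      · rintro ⟨o, hol, honr, habs⟩
        by_cases hor : o ∈ rest
        · cases rest with
          | nil => cases hor
          | cons n t =>
            have hrn : r < n := hpwc.1 n (by simp)
            have hno : n ≤ o := by
              rcases List.mem_cons.mp hor with h | h
              · omega
              · have := (List.pairwise_cons.mp hpwc.2).1 o h; omega
            have hro : r < o := hpwc.1 o hor
            simp only [Bool.or_eq_true, decide_eq_true_eq]
            right; omega
        · have honp : o ∉ r :: rest := by simp [honr, hor]
          cases prev with
          | none => exact absurd (hnone rfl o hol) honp
          | some p =>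
            obtain ⟨hpl, hplt, hple⟩ := hprev p rfl
            have hop : o ≤ p := hple o hol honp
            have hpr : p < r := hplt r (by simp)
            simp only [Bool.or_eq_true, decide_eq_true_eq]
            left; omega
      · intro hk
        cases prev with
        | some p =>
          simp only [Bool.or_eq_true, decide_eq_true_eq] at hk
          rcases hk with hk | hk
          · obtain ⟨hpl, hplt, _⟩ := hprev p rfl
            have hpr : p < r := hplt r (by simp)
            exact ⟨p, hpl, by omega, by omega⟩
          · cases rest with
            | nil => exact absurd hk (by simp)
            | cons n t =>
              have hrn : r < n := hpwc.1 n (by simp)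
              have h3 : n - r ≤ 3 := of_decide_eq_true hk
              exact ⟨n, hsub n (by simp), by omega, by omega⟩
        | none =>
          cases rest with
          | nil => exact absurd hk (by simp)
          | cons n t =>
            simp only [Bool.false_or, decide_eq_true_eq] at hk
            have hrn : r < n := hpwc.1 n (by simp)
            exact ⟨n, hsub n (by simp), by omega, by omega⟩
    have ih : rest.filter (fun res => l.any (fun other => (other != res) && decide ((res - other).natAbs ≤ 3)))
        = pvKeepLoop (some r) rest := by
      refine pvKeep_eq_filter rest (some r) l hpwc.2 (fun x hx => hsub x (by simp [hx])) ?_ (by simp)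
      intro p hp
      cases hp
      refine ⟨hrl, hpwc.1, ?_⟩
      intro o hol hor
      by_cases hoR : o = r
      · omega
      · have honp : o ∉ r :: rest := by simp [hoR, hor]
        cases prev with
        | none => exact absurd (hnone rfl o hol) honp
        | some p' =>
          obtain ⟨_, hplt, hple⟩ := hprev p' rfl
          have h1 : o ≤ p' := hple o hol honp
          have h2 : p' < r := hplt r (by simp)
          omega
    rw [List.filter_cons]
    simp only [pvKeepLoop, hpred, ih]
    cases hK : (pvPrevOk prev r || pvNextOk r rest) <;> simp

-- ===== VERDICT (by name: the statement is the Claim_ definition above) =====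
theorem fill_gaps_and_remove_isolated_residues_spec : Claim_equal_fill_gaps_and_remove_isolated_residues := by
  intro residues _ hpre
  unfold Spec_fill_gaps_and_remove_isolated_residues
  unfold fill_gaps_and_remove_isolated_residues fill_gaps_and_remove_isolated_residues_alt
  dsimp only
  have hs : (PySem.List.sorted (PySem.Set.ofList residues) (fun x => x) false).Pairwise (· < ·) :=
    PySem.List.sorted_ofList_pairwise_lt residues
  set s := PySem.List.sorted (PySem.Set.ofList residues) (fun x => x) false with hs_def
  have hsne : s ≠ [] := by
    intro h
    rw [hs_def] at h
    have h0 : PySem.Set.ofList residues = [] := (PySem.List.sorted_eq_nil_iff _ _ _).mp h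
    cases residues with
    | nil => exact hpre rfl
    | cons a t =>
      have ha : (a : Int) ∈ PySem.Set.ofList (a :: t) := by
        simp [PySem.Set.mem_ofList]
      rw [h0] at ha
      cases ha
  -- the two intermediate lists coincide
  have hget : (match PySem.List.pyGet? s (-1) with | some x => [x] | none => []) = pvTailPart s := by
    rw [PySem.List.pyGet?_neg_one, pvTailPart]
  have hloop : pvAWhile s 0 [] = pvFillPairs s := by
    rw [pvAWhile_eq s 0 [], List.drop_zero, List.nil_append, pvFillA_eq_pairs s hs]
  rw [hloop, hget]
  set inter := pvFillPairs s ++ pvTailPart s with hinter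
  have hip : inter.Pairwise (· < ·) := (pvFull_pairwise s hs).1
  have hfilter := pvKeep_eq_filter inter none inter hip (fun x hx => hx)
    (by intro p hp; cases hp) (fun _ o ho => ho)
  rw [hfilter]
  have hsub := pvKeepLoop_sublist none inter
  have hkp : (pvKeepLoop none inter).Pairwise (· ≤ ·) :=
    (hip.sublist hsub).imp (fun h => le_of_lt h)
  exact PySem.List.sorted_eq_self_of_pairwise _ _ hkp
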